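-- pv_equiv track=rewrite | github.com/iam2dael2/meowtritionist | commons/langchain/prompt.py | string_to_stream
-- ===== SOURCE A (Python) =====
-- def string_to_stream(string_list, prefix="", separator=", ", suffix="."):
--     # Add punctuation mark in beginning of string
--     yield prefix
--
--     for i in range(len(string_list)*2):
--         if i == len(string_list)*2-1:
--             yield suffix
--
--         elif i % 2 == 0:
--             yield string_list[i//2]
--
--         else:
--             yield separator
-- ===== SOURCE B (Python) =====
-- def string_to_stream(string_list, prefix="", separator=", ", suffix="."):
--     yield prefix
--     n = len(string_list)
--     for i, s in enumerate(string_list):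
--         yield s
--         yield suffix if i == n - 1 else separator
-- ===== Notes on version B (the rewrite author's own statement) =====
-- stated objective: simpler
-- what changed: Replaces A's range(2*len) parity/integer-division index scheme with a single enumerate pass over the list itself, yielding each element and then suffix (if last) or separator.
import Mathlib
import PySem

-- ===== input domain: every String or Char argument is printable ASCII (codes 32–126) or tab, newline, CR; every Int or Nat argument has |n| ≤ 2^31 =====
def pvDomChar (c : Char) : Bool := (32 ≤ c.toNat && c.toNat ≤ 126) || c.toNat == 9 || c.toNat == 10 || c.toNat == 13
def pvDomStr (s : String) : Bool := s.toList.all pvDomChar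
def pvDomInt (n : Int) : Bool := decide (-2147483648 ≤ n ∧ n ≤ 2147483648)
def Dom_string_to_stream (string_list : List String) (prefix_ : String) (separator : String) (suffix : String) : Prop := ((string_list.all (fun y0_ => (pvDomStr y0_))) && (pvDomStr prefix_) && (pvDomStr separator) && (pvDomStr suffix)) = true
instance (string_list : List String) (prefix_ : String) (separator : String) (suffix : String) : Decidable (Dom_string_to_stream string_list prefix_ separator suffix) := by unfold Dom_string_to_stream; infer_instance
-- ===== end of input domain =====

-- B replaces A's range(2*len) parity/integer-division index scheme with a single
-- enumerate pass yielding each element then suffix-if-last else separator (objective: simpler).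


-- ===== PORT A =====
-- loop body of A's 'for i in range(len(string_list)*2)' (branches in A's order)
def pvStepA (string_list : List String) (separator suffix : String) (acc : List String) (i : Int) : List String :=
  if i = (string_list.length : Int) * 2 - 1 then acc ++ [suffix]
  else if PySem.Int.mod i 2 = 0 then acc ++ [PySem.List.pyGetD string_list (PySem.Int.floordiv i 2) ""]
  else acc ++ [separator]

def string_to_stream (string_list : List String) (prefix_ : String) (separator : String) (suffix : String) : List String :=
  (PySem.List.pyRange 0 ((string_list.length : Int) * 2) 1).foldl
    (pvStepA string_list separator suffix) [prefix_]

-- ===== PORT B =====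
-- B's loop over enumerate(string_list): yield s, then suffix if i == n-1 else separator
def pvGoB (n : Int) (separator suffix : String) : List (Int × String) → List String
  | [] => []
  | (i, s) :: rest =>
      s :: (if i = n - 1 then suffix else separator) :: pvGoB n separator suffix rest

def string_to_stream_alt (string_list : List String) (prefix_ : String) (separator : String) (suffix : String) : List String :=
  prefix_ :: pvGoB (string_list.length : Int) separator suffix (PySem.List.enumerate string_list 0)

-- ===== PRECONDITION & SPEC =====
def Spec_string_to_stream (string_list : List String) (prefix_ : String) (separator : String) (suffix : String) (out : List String) : Prop := out = string_to_stream_alt string_list prefix_ separator suffix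
instance (string_list : List String) (prefix_ : String) (separator : String) (suffix : String) (out : List String) : Decidable (Spec_string_to_stream string_list prefix_ separator suffix out) := by unfold Spec_string_to_stream; infer_instance

-- ===== CLAIM (what is proved, stated in full; the proofs are below) =====
def Claim_equal_string_to_stream : Prop := ∀ (string_list : List String) (prefix_ : String) (separator : String) (suffix : String), Dom_string_to_stream string_list prefix_ separator suffix → Spec_string_to_stream string_list prefix_ separator suffix (string_to_stream string_list prefix_ separator suffix)

-- ===== LEMMAS AND PROOFS =====
-- common characterisation of what both loops emit after the prefix
def pvCore (separator suffix : String) : List String → List String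
  | [] => []
  | [x] => [x, suffix]
  | x :: y :: t => x :: separator :: pvCore separator suffix (y :: t)

lemma pvGoB_eq_core (separator suffix : String) :
    ∀ (t : List String) (n i : Int), i + t.length = n →
      pvGoB n separator suffix (PySem.List.enumerate t i) = pvCore separator suffix t := by
  intro t
  induction t with
  | nil => intro n i h; simp [PySem.List.enumerate_nil, pvGoB, pvCore]
  | cons x t' ih =>
    intro n i h
    rw [PySem.List.enumerate_cons]
    simp only [pvGoB]
    cases t' with
    | nil =>
      rw [PySem.List.enumerate_nil]
      simp only [pvGoB, pvCore]
      rw [if_pos (by simp at h; omega)]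
    | cons y t'' =>
      rw [ih n (i + 1) (by simp at h ⊢; omega)]
      simp only [pvCore]
      rw [if_neg (by simp at h; omega)]

lemma pvFoldA_eq_core (l : List String) (separator suffix : String) :
    ∀ (t : List String) (j : Nat) (acc : List String), l.drop j = t → j + t.length = l.length →
      (PySem.List.pyRange ((j : Int) * 2) ((l.length : Int) * 2) 1).foldl
        (pvStepA l separator suffix) acc = acc ++ pvCore separator suffix t := by
  intro t
  induction t with
  | nil =>
    intro j acc hdrop hlen
    rw [PySem.List.pyRange_one_eq_nil (by simp at hlen; omega)]
    simp [pvCore]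
  | cons x t' ih =>
    intro j acc hdrop hlen
    have hjx : l[j]? = some x := by
      have h0 : (l.drop j)[0]? = l[j + 0]? := List.getElem?_drop
      rw [hdrop] at h0; simpa using h0.symm
    have hj : j < l.length := by simp at hlen; omega
    rw [PySem.List.pyRange_one_cons (by omega)]
    simp only [List.foldl_cons]
    have hstep1 : pvStepA l separator suffix acc ((j : Int) * 2) = acc ++ [x] := by
      unfold pvStepA
      rw [if_neg (by omega)]
      rw [if_pos (by rw [PySem.Int.mod_eq_zero_iff_dvd]; exact ⟨j, by ring⟩)]
      have : PySem.Int.floordiv ((j : Int) * 2) 2 = (j : Int) := by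
        rw [PySem.Int.floordiv_eq_iff_of_pos (by omega)]; omega
      rw [this, PySem.List.pyGetD_natCast]
      simp [List.getD, hjx]
    rw [hstep1]
    cases t' with
    | nil =>
      have hlast : j + 1 = l.length := by simp at hlen; omega
      rw [PySem.List.pyRange_one_cons (by omega)]
      simp only [List.foldl_cons]
      have hstep2 : pvStepA l separator suffix (acc ++ [x]) ((j : Int) * 2 + 1) = acc ++ [x] ++ [suffix] := by
        unfold pvStepA
        rw [if_pos (by omega)]
      rw [hstep2, PySem.List.pyRange_one_eq_nil (by omega)]
      simp [pvCore]
    | cons y t'' =>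
      have hlt : j + 1 < l.length := by simp at hlen; omega
      rw [PySem.List.pyRange_one_cons (by omega)]
      simp only [List.foldl_cons]
      have hstep2 : pvStepA l separator suffix (acc ++ [x]) ((j : Int) * 2 + 1) = acc ++ [x] ++ [separator] := by
        unfold pvStepA
        rw [if_neg (by omega)]
        rw [if_neg (by rw [PySem.Int.mod_eq_zero_iff_dvd]; intro ⟨c, hc⟩; omega)]
      rw [hstep2]
      have hdrop' : l.drop (j + 1) = y :: t'' := by
        have h1 : List.drop 1 (List.drop j l) = List.drop (j + 1) l := List.drop_drop
        rw [hdrop] at h1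
        simpa using h1.symm
      have harith : (j : Int) * 2 + 1 + 1 = ((j + 1 : Nat) : Int) * 2 := by push_cast; ring
      rw [harith, ih (j + 1) (acc ++ [x] ++ [separator]) hdrop' (by simp at hlen ⊢; omega)]
      simp [pvCore]

-- ===== VERDICT (by name: the statement is the Claim_ definition above) =====
theorem string_to_stream_spec : Claim_equal_string_to_stream := by
  intro l p sep suf _
  show string_to_stream l p sep suf = string_to_stream_alt l p sep suf
  unfold string_to_stream string_to_stream_alt
  rw [pvGoB_eq_core sep suf l (l.length : Int) 0 (by simp)]
  have h0 : (0 : Int) = ((0 : Nat) : Int) * 2 := by norm_num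
  rw [h0, pvFoldA_eq_core l sep suf l 0 [p] (by simp) (by simp)]
  simp
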